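-- pv_equiv track=rewrite | github.com/manir8421/CE-450_HW_Assignment-01 | Q_03.py | foo
-- ===== SOURCE A (Python) =====
-- def foo(a, b, c, d):   # define function "foo" where parameters are a,b,c,d
--
--     input_num_list = [a, b, c, d]  # declare a variable for make a list of input value
--
--     sorted_input_number = sorted(input_num_list) # shorted the input number list to find the smallest two numbers
--
--     # make square of first 2 number
--     square = []
--     for a in sorted_input_number[:2]:
--         square.append(a ** 2)
--
--     # summatation of square and return to function
--     sum_square = 0
--     for num in square:
--         sum_square += num
--
--     return sum_square
-- ===== SOURCE B (Python) =====
-- def foo(a, b, c, d):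
--     # B: instead of fully sorting, take the minimum, remove its first
--     # occurrence, and take the minimum of the remaining three values.
--     nums = [a, b, c, d]
--     first = min(nums)
--     rest = list(nums)
--     rest.remove(first)
--     second = min(rest)
--     return first ** 2 + second ** 2
-- ===== Notes on version B (the rewrite author's own statement) =====
-- stated objective: alternative
-- what changed: B replaces the full sort of the four inputs by two min scans (min of the list, then min of the list with the first occurrence of that minimum removed), preserving multiplicity so duplicates match sorted(...)[:2].
import Mathlib
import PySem

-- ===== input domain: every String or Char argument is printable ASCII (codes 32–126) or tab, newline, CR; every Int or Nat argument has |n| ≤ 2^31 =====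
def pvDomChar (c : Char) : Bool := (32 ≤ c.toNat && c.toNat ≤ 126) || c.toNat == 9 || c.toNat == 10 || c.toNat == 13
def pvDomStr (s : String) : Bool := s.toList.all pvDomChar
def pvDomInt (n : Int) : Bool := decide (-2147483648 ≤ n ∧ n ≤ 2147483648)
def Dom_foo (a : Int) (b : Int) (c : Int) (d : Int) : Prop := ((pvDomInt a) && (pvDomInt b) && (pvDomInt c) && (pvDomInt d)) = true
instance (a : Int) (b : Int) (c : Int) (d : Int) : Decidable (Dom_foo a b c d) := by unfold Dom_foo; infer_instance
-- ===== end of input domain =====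

-- B computes the two smallest of the four values by two min scans (removing the
-- first occurrence of the minimum) instead of sorting; same result, alternative algorithm.

-- ===== PORT A =====
def foo (a : Int) (b : Int) (c : Int) (d : Int) : Int :=
  let input_num_list : List Int := [a, b, c, d]
  let sorted_input_number := PySem.List.sorted input_num_list (fun x => x) false
  let square := (PySem.List.slice sorted_input_number none (some 2)).foldl
    (fun acc x => acc ++ [x ^ 2]) ([] : List Int)
  square.foldl (fun sum_square num => sum_square + num) 0

-- ===== PORT B =====
def pyMin (xs : List Int) : Int :=
  match PySem.List.min? xs (fun x => x) with | some m => m | none => 0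
def pyRemove (xs : List Int) (v : Int) : List Int :=
  match PySem.List.remove? xs v with | some r => r | none => []

def foo_alt (a : Int) (b : Int) (c : Int) (d : Int) : Int :=
  let nums : List Int := [a, b, c, d]
  let first := pyMin nums
  let rest := pyRemove nums first
  let second := pyMin rest
  first ^ 2 + second ^ 2

-- ===== PRECONDITION & SPEC =====
def Spec_foo (a : Int) (b : Int) (c : Int) (d : Int) (out : Int) : Prop := out = foo_alt a b c d
instance (a : Int) (b : Int) (c : Int) (d : Int) (out : Int) : Decidable (Spec_foo a b c d out) := by unfold Spec_foo; infer_instance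

-- ===== CLAIM (what is proved, stated in full; the proofs are below) =====
def Claim_equal_foo : Prop := ∀ (a : Int) (b : Int) (c : Int) (d : Int), Dom_foo a b c d → Spec_foo a b c d (foo a b c d)

-- ===== LEMMAS AND PROOFS =====
lemma min_cons_sorted (xs : List Int) (m : Int)
    (hm : PySem.List.min? xs (fun y => y) = some m) :
    PySem.List.sorted xs (fun y => y) false
      = m :: PySem.List.sorted (xs.erase m) (fun y => y) false := by
  have hmem : m ∈ xs := PySem.List.min?_mem hm
  apply PySem.List.sorted_id_eq_of_perm_of_pairwise
  · exact ((PySem.List.sorted_perm _ _ _).cons m).trans (List.perm_cons_erase hmem).symm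
  · constructor
    · intro y hy
      exact PySem.List.min?_isMin hm y
        (List.mem_of_mem_erase ((PySem.List.mem_sorted _ _ _ _).mp hy))
    · exact PySem.List.sorted_pairwise _ _

theorem core (a b c d : Int) : foo a b c d = foo_alt a b c d := by
  have e1 : PySem.List.min? [a, b, c, d] (fun y => y) = some ([b, c, d].foldl min a) :=
    PySem.List.min?_id_cons _ _
  set m1 : Int := [b, c, d].foldl min a with hm1def
  have e2 : pyMin [a, b, c, d] = m1 := by simp [pyMin, e1]
  have hmem1 : m1 ∈ [a, b, c, d] := PySem.List.min?_mem e1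
  set rest : List Int := [a, b, c, d].erase m1 with hrestdef
  have e3 : pyRemove [a, b, c, d] m1 = rest := by
    simp only [pyRemove, PySem.List.remove?_eq_some_erase _ _ hmem1]; exact hrestdef.symm
  have hlen : rest.length = 3 := by
    rw [hrestdef, List.length_erase_of_mem hmem1]; rfl
  have hne : rest ≠ [] := by intro h; rw [h] at hlen; simp at hlen
  obtain ⟨m2, hm2⟩ : ∃ m2, PySem.List.min? rest (fun y => y) = some m2 := by
    cases h : PySem.List.min? rest (fun y => y) with
    | none => exact absurd ((PySem.List.min?_eq_none_iff _ _).mp h) hne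
    | some m => exact ⟨m, rfl⟩
  have e4 : pyMin rest = m2 := by simp [pyMin, hm2]
  have hs1 := min_cons_sorted [a, b, c, d] m1 e1
  have hs2 := min_cons_sorted rest m2 hm2
  have hb : foo_alt a b c d = m1 ^ 2 + m2 ^ 2 := by
    simp only [foo_alt]; rw [e2, e3, e4]
  rw [hb]
  simp only [foo]
  rw [hs1, ← hrestdef, hs2]
  rw [show (2 : Int) = ((2 : Nat) : Int) by norm_num, PySem.List.slice_to_natCast]
  simp [List.foldl]

-- ===== VERDICT (by name: the statement is the Claim_ definition above) =====
theorem foo_spec : Claim_equal_foo := by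
  intro a b c d _
  exact core a b c d
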